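-- pv_equiv track=rewrite | github.com/ximengwu22/leetcode | interview/Amazon/OA-2023/MaximumProfitable.py | maximumProfitable
-- ===== SOURCE A (Python) =====
-- import math
--
-- def maximumProfitable(arr: list):
--     count = 0
--     stack = []
--     for r in range(len(arr)+1):
--         if r == len(arr):
--             current = math.inf
--         else:
--             current = arr[r]
--
--         while len(stack) > 0 and arr[stack[-1]] < current:
--             j = stack.pop()
--
--             if len(stack) == 0:
--                 l = -1
--             else:
--                 l = stack[-1]
--
--             count += r-j+j-l-1
--
--         stack.append(r)
--
--     return count
-- ===== SOURCE B (Python) =====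
-- def maximumProfitable(arr: list):
--     n = len(arr)
--     total = 0
--     for j in range(n):
--         pge = max((i for i in range(j) if arr[i] >= arr[j]), default=-1)
--         nge = min((i for i in range(j + 1, n) if arr[i] > arr[j]), default=n)
--         total += nge - pge - 1
--     return total
-- ===== Notes on version B (the rewrite author's own statement) =====
-- stated objective: simpler
-- what changed: Replaces the incremental monotonic-stack accumulation by a direct per-index formulation: for each j compute the previous index with value >= arr[j] and the next index with value > arr[j] by plain scans and sum nge - pge - 1.
import Mathlib
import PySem

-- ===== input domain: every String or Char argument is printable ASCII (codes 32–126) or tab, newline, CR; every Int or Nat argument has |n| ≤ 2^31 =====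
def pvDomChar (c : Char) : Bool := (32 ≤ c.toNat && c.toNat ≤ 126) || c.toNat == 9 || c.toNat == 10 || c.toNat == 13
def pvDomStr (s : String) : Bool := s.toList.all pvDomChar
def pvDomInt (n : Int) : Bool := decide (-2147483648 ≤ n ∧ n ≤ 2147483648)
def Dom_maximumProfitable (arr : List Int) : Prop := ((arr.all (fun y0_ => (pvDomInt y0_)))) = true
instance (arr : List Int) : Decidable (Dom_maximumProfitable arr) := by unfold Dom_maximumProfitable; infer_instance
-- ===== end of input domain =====

-- B replaces A's incremental monotonic-stack accumulation by a direct per-index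
-- computation (previous index with >= value, next index with > value, sum of window sizes);
-- objective: simpler (B is O(n^2) where A is O(n); no speed is claimed).

-- ===== PORT A =====
-- Python's `l = -1 if len(stack) == 0 else stack[-1]` (our stacks keep the top at the head)
def belowInt : List Nat → Int
  | [] => -1
  | l :: _ => (l : Int)

-- inner `while` loop of A: pops while the stack is nonempty and arr[stack[-1]] < current,
-- where current = math.inf when r = len(arr) (so the comparison is then always true).
def maximumProfitablePop (arr : List Int) (r : Nat) (count : Int) (stack : List Nat) :
    Int × List Nat :=
  match stack with
  | [] => (count, [])
  | j :: rest =>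
    if r = arr.length ∨ arr.getD j 0 < arr.getD r 0 then
      -- indices on the stack are always < arr.length, and arr[r] is only compared when
      -- r < arr.length, so getD with default 0 is exact here
      maximumProfitablePop arr r (count + ((r : Int) - (j : Int) + (j : Int) - belowInt rest - 1)) rest
    else (count, j :: rest)

def maximumProfitable (arr : List Int) : Int :=
  ((List.range (arr.length + 1)).foldl
    (fun s r =>
      let p := maximumProfitablePop arr r s.1 s.2
      (p.1, r :: p.2))
    ((0 : Int), ([] : List Nat))).1

-- ===== PORT B =====
-- max((i for i in range(j) if arr[i] >= arr[j]), default=-1)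
def maximumProfitablePge (arr : List Int) (j : Nat) : Int :=
  (((List.range j).filter (fun i => decide (arr.getD j 0 ≤ arr.getD i 0))).foldl
    (fun (a : Int) (i : Nat) => max a (i : Int)) (-1))

-- min((i for i in range(j+1, n) if arr[i] > arr[j]), default=n)
def maximumProfitableNge (arr : List Int) (j : Nat) : Int :=
  (((List.range' (j + 1) (arr.length - (j + 1))).filter
      (fun i => decide (arr.getD j 0 < arr.getD i 0))).foldl
    (fun (a : Int) (i : Nat) => min a (i : Int)) (arr.length : Int))

def maximumProfitable_alt (arr : List Int) : Int :=
  (List.range arr.length).foldl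
    (fun total j => total + (maximumProfitableNge arr j - maximumProfitablePge arr j - 1))
    0

-- ===== PRECONDITION & SPEC =====
def Spec_maximumProfitable (arr : List Int) (out : Int) : Prop := out = maximumProfitable_alt arr
instance (arr : List Int) (out : Int) : Decidable (Spec_maximumProfitable arr out) := by unfold Spec_maximumProfitable; infer_instance

-- ===== CLAIM (what is proved, stated in full; the proofs are below) =====
def Claim_equal_maximumProfitable : Prop := ∀ (arr : List Int), Dom_maximumProfitable arr → Spec_maximumProfitable arr (maximumProfitable arr)

-- ===== LEMMAS AND PROOFS =====

-- `keepP arr m j`: j would still be on A's stack after processing indices 0..m-1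
abbrev keepP (arr : List Int) (m j : Nat) : Prop :=
  ∀ i, i < m → j < i → arr.getD i 0 ≤ arr.getD j 0

-- per-index weight that B sums
def wgt (arr : List Int) (j : Nat) : Int :=
  maximumProfitableNge arr j - maximumProfitablePge arr j - 1

lemma foldl_min_const {L : List Nat} :
    ∀ {b : Int}, (∀ x ∈ L, b ≤ (x : Int)) →
      L.foldl (fun (a : Int) (i : Nat) => min a (i : Int)) b = b := by
  induction L with
  | nil => intro b _; rfl
  | cons x L ih =>
    intro b h
    simp only [List.foldl_cons]
    rw [min_eq_left (h x (by simp))]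
    exact ih (fun y hy => h y (by simp [hy]))

lemma foldl_add_eq {w : Nat → Int} :
    ∀ (L : List Nat) (c : Int), L.foldl (fun t j => t + w j) c = c + (L.map w).sum := by
  intro L
  induction L with
  | nil => intro c; simp
  | cons x L ih => intro c; simp [ih]; ring

lemma sum_map_add {f g : Nat → Int} :
    ∀ (L : List Nat), (L.map (fun j => f j + g j)).sum = (L.map f).sum + (L.map g).sum := by
  intro L
  induction L with
  | nil => simp
  | cons x L ih => simp [ih]; ring

-- foldl max over a filtered range equals the head of its reverse, and that head is the
-- greatest index below k satisfying p (or there is none)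
lemma filter_range_max (p : Nat → Bool) :
    ∀ k : Nat, (((List.range k).filter p).foldl (fun (a : Int) (i : Nat) => max a (i : Int)) (-1)
            = belowInt ((List.range k).filter p).reverse)
      ∧ ((((List.range k).filter p).reverse = [] ∧ ∀ l, l < k → ¬ p l)
        ∨ (∃ l L', ((List.range k).filter p).reverse = l :: L' ∧ l < k ∧ p l
             ∧ ∀ i, l < i → i < k → ¬ p i)) := by
  intro k
  induction k with
  | zero => simp [belowInt]
  | succ k ih =>
    rcases ih with ⟨hfold, hch⟩
    by_cases hp : p k
    · constructor
      · rw [List.range_succ, List.filter_append, List.foldl_append, hfold]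
        have hb : belowInt ((List.range k).filter p).reverse < (k : Int) := by
          rcases hch with ⟨h1, _⟩ | ⟨l, L', h1, hl, _⟩
          · rw [h1]; show (-1 : Int) < (k : Int); omega
          · rw [h1]; show ((l : Nat) : Int) < (k : Int); exact_mod_cast hl
        simp only [List.filter_cons, hp, if_pos, List.filter_nil, List.foldl_cons,
          List.foldl_nil]
        rw [max_eq_right hb.le]
        simp [belowInt]
      · right
        refine ⟨k, ((List.range k).filter p).reverse, ?_, Nat.lt_succ_self k, hp,
          fun i hi hik => absurd hi (by omega)⟩
        simp [List.range_succ, hp]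
    · constructor
      · rw [List.range_succ, List.filter_append, List.foldl_append]
        simp [hp, hfold, List.range_succ]
      · rcases hch with ⟨h1, h2⟩ | ⟨l, L', h1, hl, hpl, h2⟩
        · left
          constructor
          · simp [List.range_succ, hp, h1]
          · intro l hl
            rcases Nat.lt_succ_iff_lt_or_eq.mp hl with h | h
            · exact h2 l h
            · subst h; simp [hp]
        · right
          refine ⟨l, L', ?_, Nat.lt_succ_of_lt hl, hpl, ?_⟩
          · simp [List.range_succ, hp, h1]
          · intro i hi hik
            rcases Nat.lt_succ_iff_lt_or_eq.mp hik with h | h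
            · exact h2 i hi h
            · subst h; simp [hp]

-- foldl min over a filtered range' equals its head (default N), which is the least index
-- of the interval satisfying p
lemma filter_range'_min (p : Nat → Bool) (N : Int) :
    ∀ (k a : Nat), (∀ i : Nat, a ≤ i → i < a + k → (i : Int) < N) →
      ((((List.range' a k).filter p).foldl (fun (b : Int) (i : Nat) => min b (i : Int)) N
          = (match ((List.range' a k).filter p) with | [] => N | r :: _ => (r : Int)))
        ∧ ((((List.range' a k).filter p) = [] ∧ ∀ i, a ≤ i → i < a + k → ¬ p i)
          ∨ (∃ r L', ((List.range' a k).filter p) = r :: L' ∧ a ≤ r ∧ r < a + k ∧ p r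
               ∧ (∀ i, a ≤ i → i < r → ¬ p i)
               ∧ ∀ x ∈ L', r ≤ x))) := by
  intro k
  induction k with
  | zero =>
    intro a _
    refine ⟨by simp, Or.inl ⟨by simp, ?_⟩⟩
    intro i h1 h2; omega
  | succ k ih =>
    intro a hN
    have hrs : List.range' a (k + 1) = a :: List.range' (a + 1) k := by
      simp [List.range'_succ]
    rcases ih (a + 1) (fun i h1 h2 => hN i (by omega) (by omega)) with ⟨hfold, hch⟩
    by_cases hp : p a
    · have hmem : ∀ x ∈ (List.range' (a + 1) k).filter p, (a : Int) ≤ (x : Int) := by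
        intro x hx
        have := List.mem_range'.mp (List.mem_of_mem_filter hx)
        exact_mod_cast Nat.le_of_lt (by omega : a < x)
      constructor
      · rw [hrs]
        simp only [List.filter_cons, hp, if_pos, List.foldl_cons]
        rw [min_eq_right (le_of_lt (hN a le_rfl (by omega)))]
        rw [foldl_min_const hmem]
      · right
        refine ⟨a, (List.range' (a + 1) k).filter p, ?_, le_rfl, by omega, hp,
          fun i h1 h2 => absurd h2 (by omega), ?_⟩
        · rw [hrs]; simp [hp]
        · intro x hx
          have := List.mem_range'.mp (List.mem_of_mem_filter hx)
          omega
    · constructor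
      · rw [hrs]; simp only [List.filter_cons, hp]; simpa using hfold
      · rcases hch with ⟨h1, h2⟩ | ⟨r, L', h1, hr1, hr2, hpr, h2, h3⟩
        · left
          constructor
          · rw [hrs]; simp [hp, h1]
          · intro i hi1 hi2
            rcases Nat.eq_or_lt_of_le hi1 with h | h
            · subst h; simp [hp]
            · exact h2 i h (by omega)
        · right
          refine ⟨r, L', ?_, by omega, by omega, hpr, ?_, h3⟩
          · rw [hrs]; simp [hp, h1]
          · intro i hi1 hi2
            rcases Nat.eq_or_lt_of_le hi1 with h | h
            · subst h; simp [hp]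
            · exact h2 i h hi2

-- characterization of B's pge
lemma pge_spec (arr : List Int) (j : Nat) :
    (maximumProfitablePge arr j = -1 ∧ ∀ l, l < j → arr.getD l 0 < arr.getD j 0)
    ∨ (∃ l, l < j ∧ maximumProfitablePge arr j = (l : Int)
         ∧ arr.getD j 0 ≤ arr.getD l 0
         ∧ ∀ i, l < i → i < j → arr.getD i 0 < arr.getD j 0) := by
  rcases filter_range_max (fun i => decide (arr.getD j 0 ≤ arr.getD i 0)) j with ⟨hfold, hch⟩
  rcases hch with ⟨h1, h2⟩ | ⟨l, L', h1, hl, hpl, h2⟩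
  · left
    refine ⟨?_, fun l hl => by simpa using h2 l hl⟩
    unfold maximumProfitablePge
    rw [hfold, h1]; rfl
  · right
    refine ⟨l, hl, ?_, by simpa using hpl, fun i h1' h2' => by simpa using h2 i h1' h2'⟩
    unfold maximumProfitablePge
    rw [hfold, h1]; rfl

-- characterization of B's nge (for j < arr.length)
lemma nge_spec (arr : List Int) (j : Nat) (hj : j < arr.length) :
    (maximumProfitableNge arr j = (arr.length : Int)
        ∧ ∀ i, j < i → i < arr.length → arr.getD i 0 ≤ arr.getD j 0)
    ∨ (∃ r, j < r ∧ r < arr.length ∧ maximumProfitableNge arr j = (r : Int)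
         ∧ arr.getD j 0 < arr.getD r 0
         ∧ ∀ i, j < i → i < r → arr.getD i 0 ≤ arr.getD j 0) := by
  have hb : ∀ i, j + 1 ≤ i → i < (j + 1) + (arr.length - (j + 1)) → (i : Int) < (arr.length : Int) := by
    intro i h1 h2; exact_mod_cast (by omega : i < arr.length)
  rcases filter_range'_min (fun i => decide (arr.getD j 0 < arr.getD i 0)) (arr.length : Int)
      (arr.length - (j + 1)) (j + 1) hb with ⟨hfold, hch⟩
  rcases hch with ⟨h1, h2⟩ | ⟨r, L', h1, hr1, hr2, hpr, h2, _⟩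
  · left
    constructor
    · unfold maximumProfitableNge; rw [hfold, h1]
    · intro i hi1 hi2
      have := h2 i (by omega) (by omega)
      simpa using this
  · right
    refine ⟨r, by omega, by omega, ?_, by simpa using hpr, ?_⟩
    · unfold maximumProfitableNge; rw [hfold, h1]
    · intro i hi1 hi2
      have := h2 i (by omega) hi2
      simpa using this

-- ¬keep m j ↔ nge j < m (for j < m ≤ n)
lemma nge_lt_iff (arr : List Int) {m j : Nat} (hm : m ≤ arr.length) (hj : j < m) :
    maximumProfitableNge arr j < (m : Int) ↔ ¬ keepP arr m j := by
  rcases nge_spec arr j (by omega) with ⟨h1, h2⟩ | ⟨r, hr1, hr2, h1, h2, h3⟩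
  · rw [h1]
    constructor
    · intro h; exfalso; omega
    · intro h; exfalso
      exact h (fun i hi hji => h2 i hji (by omega))
  · rw [h1]
    constructor
    · intro h hkeep
      have hrm : r < m := by exact_mod_cast h
      have := hkeep r hrm hr1
      omega
    · intro h
      by_contra hc
      have hmr : m ≤ r := by exact_mod_cast not_lt.mp hc
      exact h (fun i hi hji => h3 i hji (by omega))

-- if j stays on the stack, its pge also stays on the stack
lemma pge_keep (arr : List Int) {m j l : Nat} (hm : m ≤ arr.length) (hj : j < m)
    (hk : keepP arr m j) (hl : l < j) (hge : arr.getD j 0 ≤ arr.getD l 0)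
    (hmax : ∀ i, l < i → i < j → arr.getD i 0 < arr.getD j 0) :
    keepP arr m l := by
  intro i hi hli
  rcases lt_trichotomy i j with h | h | h
  · exact le_of_lt (lt_of_lt_of_le (hmax i hli h) hge)
  · subst h; exact hge
  · exact le_trans (hk i hi h) hge

-- the element below j on the stack is exactly B's pge of j
lemma below_eq_pge (arr : List Int) {m j : Nat} (hm : m ≤ arr.length) (hj : j < m)
    (hk : keepP arr m j) :
    belowInt ((List.range j).filter (fun l => decide (keepP arr m l))).reverse
      = maximumProfitablePge arr j := by
  rcases filter_range_max (fun l => decide (keepP arr m l)) j with ⟨_, hch⟩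
  rcases hch with ⟨h1, h2⟩ | ⟨l, L', h1, hl, hpl, h2⟩
  · rw [h1]
    rcases pge_spec arr j with ⟨hp, _⟩ | ⟨l, hl, hp, hge, hmax⟩
    · rw [hp]; rfl
    · exfalso
      have hnk : ¬ keepP arr m l := by simpa using h2 l hl
      exact hnk (pge_keep arr hm hj hk hl hge hmax)
  · rw [h1]
    have hkl : keepP arr m l := by simpa using hpl
    rcases pge_spec arr j with ⟨hp, hall⟩ | ⟨l', hl', hp, hge, hmax⟩
    · exfalso
      exact absurd (hkl j hj hl) (by have := hall l hl; omega)
    · rw [hp]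
      have hkl' : keepP arr m l' := pge_keep arr hm hj hk hl' hge hmax
      have hle1 : l' ≤ l := by
        by_contra hc
        have hnk : ¬ keepP arr m l' := by simpa using h2 l' (by omega) hl'
        exact hnk hkl'
      have hle2 : l ≤ l' := by
        by_contra hc
        have hgj : arr.getD j 0 ≤ arr.getD l 0 := hkl j hj hl
        have := hmax l (by omega) hl
        omega
      have : l = l' := by omega
      subst this
      rfl

lemma pop_cons (arr : List Int) (r : Nat) (count : Int) (j : Nat) (rest : List Nat) :
    maximumProfitablePop arr r count (j :: rest)
      = if r = arr.length ∨ arr.getD j 0 < arr.getD r 0 then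
          maximumProfitablePop arr r
            (count + ((r : Int) - (j : Int) + (j : Int) - belowInt rest - 1)) rest
        else (count, j :: rest) := rfl

lemma filter_range_succ_false {p : Nat → Bool} {k : Nat} (h : p k = false) :
    (List.range (k + 1)).filter p = (List.range k).filter p := by
  rw [List.range_succ, List.filter_append]
  simp [List.filter_singleton, h]

lemma filter_range_succ_true {p : Nat → Bool} {k : Nat} (h : p k = true) :
    (List.range (k + 1)).filter p = (List.range k).filter p ++ [k] := by
  rw [List.range_succ, List.filter_append]
  simp [List.filter_singleton, h]

lemma map_range_succ_sum (f : Nat → Int) (k : Nat) :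
    ((List.range (k + 1)).map f).sum = ((List.range k).map f).sum + f k := by
  rw [List.range_succ]; simp

-- behaviour of A's inner while loop on a stack of survivors
lemma popGen (arr : List Int) (r : Nat) (hr : r ≤ arr.length) :
    ∀ k, k ≤ r → ∀ c : Int,
      maximumProfitablePop arr r c
          (((List.range k).filter (fun j => decide (keepP arr r j))).reverse)
        = (c + ((List.range k).map (fun j =>
              if keepP arr r j ∧ ¬ (r < arr.length ∧ keepP arr (r + 1) j)
              then wgt arr j else 0)).sum,
           ((List.range k).filter
              (fun j => decide (r < arr.length ∧ keepP arr (r + 1) j))).reverse) := by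
  intro k
  induction k with
  | zero => intro _ c; simp [maximumProfitablePop]
  | succ k ih =>
    intro hk c
    have hkr : k < r := hk
    by_cases hkeep : keepP arr r k
    · have hkd : decide (keepP arr r k) = true := decide_eq_true hkeep
      have hsplit : ((List.range (k + 1)).filter (fun j => decide (keepP arr r j))).reverse
          = k :: ((List.range k).filter (fun j => decide (keepP arr r j))).reverse := by
        simp [List.range_succ, List.filter_append, hkd]
      by_cases hpop : r = arr.length ∨ arr.getD k 0 < arr.getD r 0
      · -- k is popped
        have hnosurv : ¬ (r < arr.length ∧ keepP arr (r + 1) k) := by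
          rintro ⟨hrl, hk1⟩
          rcases hpop with h | h
          · omega
          · have := hk1 r (by omega) hkr
            omega
        have hwgt : ((r : Int) - (k : Int) + (k : Int) - maximumProfitablePge arr k - 1)
            = wgt arr k := by
          have hnge : maximumProfitableNge arr k = (r : Int) := by
            by_cases hrn : r = arr.length
            · -- r = n : keep n k gives nge = n
              subst hrn
              rcases nge_spec arr k (by omega) with ⟨h1, _⟩ | ⟨r', hr1, hr2, h1, h2, _⟩
              · exact h1
              · exfalso
                have := hkeep r' hr2 hr1
                omega
            · -- r < n and arr[k] < arr[r] : nge = r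
              have hrl : r < arr.length := by omega
              have h : arr.getD k 0 < arr.getD r 0 := hpop.resolve_left hrn
              have hlt : maximumProfitableNge arr k < (((r + 1 : Nat)) : Int) := by
                rw [nge_lt_iff arr (show r + 1 ≤ arr.length from by omega) (show k < r + 1 from by omega)]
                intro hkp
                have := hkp r (by omega) hkr
                omega
              have hge : ¬ (maximumProfitableNge arr k < (r : Int)) := by
                rw [nge_lt_iff arr (show r ≤ arr.length from by omega) hkr]
                exact not_not_intro hkeep
              push_cast at hlt
              omega
          unfold wgt
          rw [hnge]
          ring
        have hnsd : decide (r < arr.length ∧ keepP arr (r + 1) k) = false :=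
          decide_eq_false hnosurv
        rw [hsplit, pop_cons, if_pos hpop, below_eq_pge arr hr hkr hkeep,
          ih (by omega) (c + ((r : Int) - (k : Int) + (k : Int) - maximumProfitablePge arr k - 1)),
          Prod.mk.injEq]
        constructor
        · rw [List.range_succ]
          simp only [List.map_append, List.sum_append, List.map_cons, List.map_nil,
            List.sum_cons, List.sum_nil]
          rw [if_pos ⟨hkeep, hnosurv⟩, hwgt]
          ring
        · rw [filter_range_succ_false hnsd]
      · -- k survives: loop stops, nothing below pops either
        have hrl : r < arr.length := by
          rcases Nat.lt_or_ge r arr.length with h' | h'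
          · exact h'
          · exact absurd (Or.inl (by omega)) hpop
        have hks : arr.getD r 0 ≤ arr.getD k 0 := by
          by_contra hlt
          exact hpop (Or.inr (by omega))
        have hsurvk : keepP arr (r + 1) k := by
          intro i hi hki
          rcases Nat.lt_succ_iff_lt_or_eq.mp hi with h | h
          · exact hkeep i h hki
          · subst h; exact hks
        have hsurv : ∀ j, j < k + 1 → keepP arr r j → keepP arr (r + 1) j := by
          intro j hjk hkj i hi hji
          rcases Nat.lt_succ_iff_lt_or_eq.mp hi with h | h
          · exact hkj i h hji
          · subst h
            rcases Nat.lt_succ_iff_lt_or_eq.mp hjk with h' | h'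
            · exact le_trans hks (hkj k (by omega) h')
            · subst h'; exact hks
        have hfeq : (List.range (k + 1)).filter
              (fun j => decide (r < arr.length ∧ keepP arr (r + 1) j))
            = (List.range (k + 1)).filter (fun j => decide (keepP arr r j)) := by
          apply List.filter_congr
          intro j hj
          have hjk : j < k + 1 := List.mem_range.mp hj
          simp only [decide_eq_decide]
          constructor
          · rintro ⟨_, h⟩ i hi hji; exact h i (by omega) hji
          · intro h; exact ⟨hrl, hsurv j hjk h⟩
        have hzero : ((List.range (k + 1)).map (fun j =>
              if keepP arr r j ∧ ¬ (r < arr.length ∧ keepP arr (r + 1) j)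
              then wgt arr j else 0)).sum = 0 := by
          rw [List.sum_eq_zero]
          intro x hx
          rcases List.mem_map.mp hx with ⟨j, hj, hxe⟩
          have hjk : j < k + 1 := List.mem_range.mp hj
          rw [← hxe]
          by_cases hkj : keepP arr r j
          · exact if_neg (fun h => h.2 ⟨hrl, hsurv j hjk hkj⟩)
          · exact if_neg (fun h => hkj h.1)
        rw [hsplit, pop_cons, if_neg hpop, hfeq, hzero, hsplit]
        simp
    · -- k was never on the stack
      have hnkd : decide (keepP arr r k) = false := decide_eq_false hkeep
      have hsplit : (List.range (k + 1)).filter (fun j => decide (keepP arr r j))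
          = (List.range k).filter (fun j => decide (keepP arr r j)) := by
        simp [List.range_succ, hnkd]
      have hnosurv : ¬ (r < arr.length ∧ keepP arr (r + 1) k) := by
        rintro ⟨_, hk1⟩
        exact hkeep (fun i hi hki => hk1 i (by omega) hki)
      have hnsd : decide (r < arr.length ∧ keepP arr (r + 1) k) = false :=
        decide_eq_false hnosurv
      rw [hsplit, ih (by omega) c, Prod.mk.injEq]
      constructor
      · rw [map_range_succ_sum, if_neg (fun h => hkeep (And.left h))]
        ring
      · rw [filter_range_succ_false hnsd]

-- invariant of A's main loop after processing indices 0..m-1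
lemma mainInv (arr : List Int) :
    ∀ m, m ≤ arr.length →
      (List.range m).foldl
        (fun s r =>
          let p := maximumProfitablePop arr r s.1 s.2
          (p.1, r :: p.2))
        ((0 : Int), ([] : List Nat))
      = (((List.range m).map (fun j => if keepP arr m j then 0 else wgt arr j)).sum,
         ((List.range m).filter (fun j => decide (keepP arr m j))).reverse) := by
  intro m
  induction m with
  | zero => intro _; simp
  | succ m ih =>
    intro hm
    have hml : m < arr.length := hm
    have hkm : keepP arr (m + 1) m := by intro i hi hmi; omega
    have hkmd : decide (keepP arr (m + 1) m) = true := decide_eq_true hkm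
    have hfeq : (List.range m).filter
          (fun j => decide (m < arr.length ∧ keepP arr (m + 1) j))
        = (List.range m).filter (fun j => decide (keepP arr (m + 1) j)) := by
      apply List.filter_congr
      intro j _
      simp only [decide_eq_decide]
      exact ⟨fun h => h.2, fun h => ⟨hml, h⟩⟩
    have hstep : (List.range (m + 1)).foldl
          (fun s r =>
            let p := maximumProfitablePop arr r s.1 s.2
            (p.1, r :: p.2))
          ((0 : Int), ([] : List Nat))
        = (((List.range m).map (fun j => if keepP arr m j then (0:Int) else wgt arr j)).sum
            + ((List.range m).map (fun j =>
                if keepP arr m j ∧ ¬ (m < arr.length ∧ keepP arr (m + 1) j)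
                then wgt arr j else 0)).sum,
           m :: ((List.range m).filter (fun j => decide (keepP arr (m + 1) j))).reverse) := by
      rw [List.range_succ, List.foldl_append, ih (by omega)]
      simp only [List.foldl_cons, List.foldl_nil]
      rw [popGen arr m (by omega) m le_rfl]
      dsimp only
      rw [hfeq]
    rw [hstep, Prod.mk.injEq]
    constructor
    · -- counts agree
      have hpt : ∀ j ∈ List.range m,
          (if keepP arr m j then (0:Int) else wgt arr j)
            + (if keepP arr m j ∧ ¬ (m < arr.length ∧ keepP arr (m + 1) j)
               then wgt arr j else 0)
          = (if keepP arr (m + 1) j then (0:Int) else wgt arr j) := by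
        intro j hj
        by_cases h1 : keepP arr (m + 1) j
        · have h0 : keepP arr m j := fun i hi hji => h1 i (by omega) hji
          rw [if_pos h0, if_neg (fun h => h.2 ⟨hml, h1⟩), if_pos h1]
          ring
        · by_cases h0 : keepP arr m j
          · rw [if_pos h0, if_pos ⟨h0, fun h => h1 h.2⟩, if_neg h1]
            ring
          · rw [if_neg h0, if_neg (fun h => h0 h.1), if_neg h1]
            ring
      calc ((List.range m).map (fun j => if keepP arr m j then (0:Int) else wgt arr j)).sum
            + ((List.range m).map (fun j =>
                if keepP arr m j ∧ ¬ (m < arr.length ∧ keepP arr (m + 1) j)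
                then wgt arr j else 0)).sum
          = ((List.range m).map (fun j => (if keepP arr m j then (0:Int) else wgt arr j)
              + (if keepP arr m j ∧ ¬ (m < arr.length ∧ keepP arr (m + 1) j)
                 then wgt arr j else 0))).sum := (sum_map_add _).symm
        _ = ((List.range m).map (fun j => if keepP arr (m + 1) j then (0:Int) else wgt arr j)).sum := by
              rw [List.map_congr_left hpt]
        _ = ((List.range (m + 1)).map (fun j => if keepP arr (m + 1) j then (0:Int) else wgt arr j)).sum := by
              rw [map_range_succ_sum, if_pos hkm, add_zero]
    · -- stacks agree
      rw [filter_range_succ_true hkmd]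
      simp

-- ===== VERDICT (by name: the statement is the Claim_ definition above) =====
theorem maximumProfitable_spec : Claim_equal_maximumProfitable := by
  intro arr _
  show maximumProfitable arr = maximumProfitable_alt arr
  have hcond : ∀ j ∈ List.range arr.length,
      (if keepP arr arr.length j then (0:Int) else wgt arr j)
        + (if keepP arr arr.length j ∧ ¬ (arr.length < arr.length ∧ keepP arr (arr.length + 1) j)
           then wgt arr j else 0)
      = wgt arr j := by
    intro j _
    by_cases h : keepP arr arr.length j
    · rw [if_pos h, if_pos ⟨h, fun hh => absurd hh.1 (lt_irrefl _)⟩]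
      ring
    · rw [if_neg h, if_neg (fun hh => h hh.1)]
      ring
  have hsum : ((List.range arr.length).map (fun j => if keepP arr arr.length j then (0:Int) else wgt arr j)).sum
      + ((List.range arr.length).map (fun j =>
          if keepP arr arr.length j ∧ ¬ (arr.length < arr.length ∧ keepP arr (arr.length + 1) j)
          then wgt arr j else 0)).sum
      = ((List.range arr.length).map (fun j => wgt arr j)).sum := by
    rw [← sum_map_add, List.map_congr_left hcond]
  have hA : maximumProfitable arr
      = ((List.range arr.length).map (fun j => if keepP arr arr.length j then (0:Int) else wgt arr j)).sum
        + ((List.range arr.length).map (fun j =>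
            if keepP arr arr.length j ∧ ¬ (arr.length < arr.length ∧ keepP arr (arr.length + 1) j)
            then wgt arr j else 0)).sum := by
    unfold maximumProfitable
    rw [List.range_succ, List.foldl_append, mainInv arr arr.length le_rfl]
    simp only [List.foldl_cons, List.foldl_nil]
    rw [popGen arr arr.length le_rfl arr.length le_rfl]
  have hB : maximumProfitable_alt arr
      = 0 + ((List.range arr.length).map
          (fun j => maximumProfitableNge arr j - maximumProfitablePge arr j - 1)).sum := by
    unfold maximumProfitable_alt
    rw [foldl_add_eq]
  rw [hA, hB, hsum]
  simp [wgt]
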